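-- pv_equiv track=rewrite | github.com/bearblog/CoreRank | baseline/utils.py | strip_stopwords
-- ===== SOURCE A (Python) =====
-- def strip_stopwords(tokenized_sentence, stopwords):
--     """ Strip stopwords
--     Consecutive stopwords at head and tail of tagged utterance are stripped
--     """
--     ib = 0
--     ie = 0
--
--     for i in range(len(tokenized_sentence)):
--
--         if tokenized_sentence[i].lower() in stopwords:
--             ib += 1
--         else:
--             break
--     for j in range(1, len(tokenized_sentence) + 1):
--
--         if tokenized_sentence[-j].lower() in stopwords:
--             ie += 1
--         else:
--             break
--     return tokenized_sentence[ib:len(tokenized_sentence) - ie]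
-- ===== SOURCE B (Python) =====
-- def strip_stopwords(tokenized_sentence, stopwords):
--     """Strip leading/trailing stopwords: one forward pass collects the indices
--     of non-stopword tokens, then the answer is the slice between the first and
--     last kept index."""
--     keep = [i for i, t in enumerate(tokenized_sentence) if t.lower() not in stopwords]
--     if not keep:
--         return tokenized_sentence[0:0]
--     return tokenized_sentence[keep[0]:keep[-1] + 1]
-- ===== Notes on version B (the rewrite author's own statement) =====
-- stated objective: alternative
-- what changed: Replaces A's two early-terminating boundary scans (forward, then backward via negative indexing) with a single forward pass that collects the indices of non-stopword tokens and slices from the first to the last kept index.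
import Mathlib
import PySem

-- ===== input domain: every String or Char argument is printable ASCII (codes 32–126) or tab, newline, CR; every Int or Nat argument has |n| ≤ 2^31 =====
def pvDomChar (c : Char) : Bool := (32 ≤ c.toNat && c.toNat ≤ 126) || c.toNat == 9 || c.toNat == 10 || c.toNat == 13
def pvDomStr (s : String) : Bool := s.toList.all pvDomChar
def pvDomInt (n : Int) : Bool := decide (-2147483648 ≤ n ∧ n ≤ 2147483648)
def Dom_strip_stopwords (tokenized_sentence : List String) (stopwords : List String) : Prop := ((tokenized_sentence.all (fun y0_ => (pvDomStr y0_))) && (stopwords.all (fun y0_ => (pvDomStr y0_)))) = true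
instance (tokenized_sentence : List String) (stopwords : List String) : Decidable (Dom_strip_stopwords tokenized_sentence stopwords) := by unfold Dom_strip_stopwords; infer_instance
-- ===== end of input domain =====

-- B replaces the two boundary scans with one index-collecting pass; same result, same cost (objective: alternative).
-- ===== PORT A =====
def pvStop (stopwords : List String) (t : String) : Bool :=
  stopwords.contains (PySem.Str.lower t)

-- first loop / second loop of A: count leading tokens of ts whose lower is in stopwords
def pvHeadCount (stopwords : List String) : List String → Nat
  | [] => 0
  | t :: rest => if pvStop stopwords t then 1 + pvHeadCount stopwords rest else 0

def strip_stopwords (tokenized_sentence : List String) (stopwords : List String) : List String :=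
  let ib : Nat := pvHeadCount stopwords tokenized_sentence
  let ie : Nat := pvHeadCount stopwords tokenized_sentence.reverse
  PySem.List.slice tokenized_sentence (some (ib : Int))
    (some ((tokenized_sentence.length : Int) - (ie : Int)))

-- ===== PORT B =====
def strip_stopwords_alt (tokenized_sentence : List String) (stopwords : List String) : List String :=
  let keep : List Int :=
    ((PySem.List.enumerate tokenized_sentence).filter
      (fun it => !(stopwords.contains (PySem.Str.lower it.2)))).map Prod.fst
  if h : keep = [] then
    PySem.List.slice tokenized_sentence (some 0) (some 0)
  else
    PySem.List.slice tokenized_sentence (some (keep.head h)) (some (keep.getLast h + 1))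

-- ===== PRECONDITION & SPEC =====
def Spec_strip_stopwords (tokenized_sentence : List String) (stopwords : List String) (out : List String) : Prop := out = strip_stopwords_alt tokenized_sentence stopwords
instance (tokenized_sentence : List String) (stopwords : List String) (out : List String) : Decidable (Spec_strip_stopwords tokenized_sentence stopwords out) := by unfold Spec_strip_stopwords; infer_instance

-- ===== CLAIM (what is proved, stated in full; the proofs are below) =====
def Claim_equal_strip_stopwords : Prop := ∀ (tokenized_sentence : List String) (stopwords : List String), Dom_strip_stopwords tokenized_sentence stopwords → Spec_strip_stopwords tokenized_sentence stopwords (strip_stopwords tokenized_sentence stopwords)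

-- ===== LEMMAS AND PROOFS =====

def pvK (stopwords : List String) (s : Int) (ts : List String) : List Int :=
  ((PySem.List.enumerate ts s).filter
    (fun it => !(stopwords.contains (PySem.Str.lower it.2)))).map Prod.fst

theorem pvK_cons (sw : List String) (s : Int) (t : String) (ts : List String) :
    pvK sw s (t :: ts) =
      if pvStop sw t then pvK sw (s + 1) ts else s :: pvK sw (s + 1) ts := by
  simp only [pvK, PySem.List.enumerate_cons, List.filter_cons]
  by_cases h : pvStop sw t
  · have h' : PySem.Str.lower t ∈ sw := by simpa [pvStop] using h
    simp [h, h']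
  · have h' : PySem.Str.lower t ∉ sw := by simpa [pvStop] using h
    simp [h, h']

theorem pvK_empty_iff (sw : List String) (s : Int) (ts : List String) :
    pvK sw s ts = [] ↔ ts.all (pvStop sw) := by
  induction ts generalizing s with
  | nil => simp [pvK]
  | cons t ts ih =>
    rw [pvK_cons]
    split_ifs with h <;> simp [h, ih]

theorem pvHeadCount_all (sw : List String) (ts : List String)
    (h : ts.all (pvStop sw)) : pvHeadCount sw ts = ts.length := by
  induction ts with
  | nil => rfl
  | cons t ts ih =>
    simp only [List.all_cons, Bool.and_eq_true] at h
    simp [pvHeadCount, h.1, ih h.2]; omega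

theorem pvHeadCount_append_all (sw : List String) (l l' : List String)
    (h : l.all (pvStop sw)) :
    pvHeadCount sw (l ++ l') = l.length + pvHeadCount sw l' := by
  induction l with
  | nil => simp
  | cons t l ih =>
    simp only [List.all_cons, Bool.and_eq_true] at h
    simp [pvHeadCount, h.1, ih h.2]; omega

theorem pvHeadCount_append_not_all (sw : List String) (l l' : List String)
    (h : ¬ l.all (pvStop sw)) :
    pvHeadCount sw (l ++ l') = pvHeadCount sw l := by
  induction l with
  | nil => simp at h
  | cons t l ih =>
    simp only [List.all_cons, Bool.and_eq_true] at h
    by_cases ht : pvStop sw t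
    · have : ¬ l.all (pvStop sw) := fun hl => h ⟨ht, hl⟩
      simp [pvHeadCount, ht, ih this]
    · simp [pvHeadCount, ht]

theorem pvK_head? (sw : List String) (s : Int) (ts : List String)
    (h : pvK sw s ts ≠ []) :
    (pvK sw s ts).head? = some (s + (pvHeadCount sw ts : Int)) := by
  induction ts generalizing s with
  | nil => simp [pvK] at h
  | cons t ts ih =>
    rw [pvK_cons] at h ⊢
    by_cases ht : pvStop sw t
    · simp only [ht, if_true] at h ⊢
      rw [ih (s + 1) h]
      simp [pvHeadCount, ht]
      omega
    · simp [pvHeadCount, ht]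

theorem pvK_getLast? (sw : List String) (s : Int) (ts : List String)
    (h : pvK sw s ts ≠ []) :
    (pvK sw s ts).getLast? =
      some (s + (ts.length : Int) - 1 - (pvHeadCount sw ts.reverse : Int)) := by
  induction ts generalizing s with
  | nil => simp [pvK] at h
  | cons t ts ih =>
    rw [pvK_cons] at h ⊢
    have hrev : (t :: ts).reverse = ts.reverse ++ [t] := by simp
    by_cases ht : pvStop sw t
    · simp only [ht, if_true] at h ⊢
      have hne : ¬ ts.all (pvStop sw) := by
        intro hall; exact h ((pvK_empty_iff sw (s + 1) ts).mpr hall)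
      have hner : ¬ ts.reverse.all (pvStop sw) := by simpa using hne
      rw [ih (s + 1) h, hrev, pvHeadCount_append_not_all sw _ _ hner]
      congr 1; simp only [List.length_cons]; push_cast; ring
    · have ht' : pvStop sw t = false := by simpa using ht
      simp only [ht', Bool.false_eq_true, if_false] at h ⊢
      by_cases he : pvK sw (s + 1) ts = []
      · have hall : ts.all (pvStop sw) := (pvK_empty_iff sw (s + 1) ts).mp he
        have hallr : ts.reverse.all (pvStop sw) := by simpa using hall
        rw [he, hrev, pvHeadCount_append_all sw _ _ hallr]
        have h0 : pvHeadCount sw [t] = 0 := by simp [pvHeadCount, ht']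
        rw [h0]
        have hs : ([s] : List Int).getLast? = some s := rfl
        rw [hs]
        simp only [List.length_cons, List.length_reverse]
        congr 1; push_cast; ring
      · have hne : ¬ ts.all (pvStop sw) := fun hall => he ((pvK_empty_iff sw (s + 1) ts).mpr hall)
        have hner : ¬ ts.reverse.all (pvStop sw) := by simpa using hne
        have hstep : (s :: pvK sw (s + 1) ts).getLast? = (pvK sw (s + 1) ts).getLast? := by
          cases hk : pvK sw (s + 1) ts with
          | nil => exact absurd hk he
          | cons b m => simp [List.getLast?_cons]
        rw [hstep, ih (s + 1) he, hrev, pvHeadCount_append_not_all sw _ _ hner]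
        congr 1; simp only [List.length_cons]; push_cast; ring

theorem pvSlice_eq (ts : List String) (sw : List String) :
    strip_stopwords ts sw = strip_stopwords_alt ts sw := by
  unfold strip_stopwords strip_stopwords_alt
  have hK : ((PySem.List.enumerate ts).filter
      (fun it => !(sw.contains (PySem.Str.lower it.2)))).map Prod.fst = pvK sw 0 ts := rfl
  simp only [hK]
  by_cases h : pvK sw 0 ts = []
  · simp only [h, dif_pos]
    have hall : ts.all (pvStop sw) := (pvK_empty_iff sw 0 ts).mp h
    have hallr : ts.reverse.all (pvStop sw) := by simpa using hall
    rw [pvHeadCount_all sw ts hall, pvHeadCount_all sw ts.reverse hallr]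
    rw [PySem.List.slice_toNat _ (by positivity) (by simp),
        PySem.List.slice_toNat _ (by norm_num) (by norm_num)]
    simp
  · simp only [h, dif_neg, not_false_iff]
    have hh := pvK_head? sw 0 ts h
    have hl := pvK_getLast? sw 0 ts h
    have h1 : (pvK sw 0 ts).head h = 0 + (pvHeadCount sw ts : Int) := by
      have := List.head?_eq_some_head h
      rw [this] at hh; exact Option.some.inj hh
    have h2 : (pvK sw 0 ts).getLast h =
        0 + (ts.length : Int) - 1 - (pvHeadCount sw ts.reverse : Int) := by
      have := List.getLast?_eq_some_getLast (l := pvK sw 0 ts) h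
      rw [this] at hl; exact Option.some.inj hl
    rw [h1, h2]
    congr 2 <;> omega

-- ===== VERDICT (by name: the statement is the Claim_ definition above) =====
theorem strip_stopwords_spec : Claim_equal_strip_stopwords := by
  intro ts sw _
  unfold Spec_strip_stopwords
  exact pvSlice_eq ts sw
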